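-- pv_equiv track=rewrite | github.com/marcelorempel/pfc_model | src/pfc_model/analysis/up_down.py | separateUD
-- ===== SOURCE A (Python) =====
-- def separateUD(state):
--     """Get indices of an UP-DOWN state array corresponding to UP and
--     DOWN periods.
--
--     Parameters
--     ----------
--     state: array or list
--         Sequence of UP-DOWN states. UP must be indicated as 1 and DOWN
--         as 0.
--
--     Returns
--     -------
--     This function returns a 2-tuple.
--     out1: list[list]
--         List of DOWN periods. Each period is represented by a list
--         containing indices of the period in state sequence.
--     out2: list[list]
--         List of UP periods. Each period is represented by a list
--         containing indices of the period in state sequence.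
--     """
--
--     last = state[0]
--     temp_i = 0
--     state_up = []
--     state_down = []
--     row = 0
--     for i in range(1,len(state),1):
--         if state[i]==last:
--             if row==0:
--                 if state[i] == 0:
--                     state_down.append([temp_i, i])
--                 else:
--                     state_up.append([temp_i, i])
--             else:
--                 if state[i] == 0:
--                     state_down[-1].append(i)
--                 else:
--                     state_up[-1].append(i)
--             row+=1
--         else:
--             row=0
--         temp_i = i
--         last=state[i]
--     return state_down, state_up
-- ===== SOURCE B (Python) =====
-- def separateUD(state):
--     """Staged re-implementation: first collect all change points (boundaries
--     between maximal constant runs), then slice index ranges between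
--     consecutive boundaries, keep those of length >= 2 and classify them by
--     the value at their start (0 -> DOWN, otherwise UP)."""
--     n = len(state)
--     bounds = [0] + [i + 1 for i, (x, y) in enumerate(zip(state, state[1:])) if x != y] + [n]
--     periods = [(a, b) for a, b in zip(bounds, bounds[1:]) if b - a >= 2]
--     down = [list(range(a, b)) for a, b in periods if state[a] == 0]
--     up = [list(range(a, b)) for a, b in periods if state[a] != 0]
--     return down, up
-- ===== Notes on version B (the rewrite author's own statement) =====
-- stated objective: alternative
-- what changed: B replaces A's single pass with running `last`/`temp_i`/`row` state and in-place appends to the last period by staged passes: it first builds the complete list of run boundaries from pairwise comparisons, then zips consecutive boundaries into (start,end) periods, filters those of length >= 2 and materializes each as an index range classified by state[start].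
import Mathlib
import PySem

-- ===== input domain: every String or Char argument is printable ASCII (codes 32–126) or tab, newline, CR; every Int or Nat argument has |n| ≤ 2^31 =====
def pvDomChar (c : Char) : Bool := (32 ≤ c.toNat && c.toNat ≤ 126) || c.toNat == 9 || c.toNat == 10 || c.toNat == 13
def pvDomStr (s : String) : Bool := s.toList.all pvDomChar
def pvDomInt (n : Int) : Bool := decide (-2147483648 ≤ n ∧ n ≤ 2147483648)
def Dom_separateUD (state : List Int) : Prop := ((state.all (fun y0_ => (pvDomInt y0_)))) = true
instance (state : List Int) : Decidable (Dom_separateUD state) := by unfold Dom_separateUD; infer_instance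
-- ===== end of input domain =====

-- B is a staged re-implementation: it first computes the full list of run boundaries
-- (change points) from pairwise comparisons, then slices and classifies the periods
-- between consecutive boundaries — replacing A's single accumulator pass (objective: alternative).

-- ===== PORT A =====
-- helper for Python's `lst[-1].append(i)`: modify the last sublist (never empty when A reaches it)
def pvModLast (l : List (List Int)) (i : Int) : List (List Int) :=
  match l.getLast? with
  | some last => l.dropLast ++ [last ++ [i]]
  | none => l

def separateUD (state : List Int) : List (List Int) × List (List Int) :=
  -- `last = state[0]` raises IndexError on []; Pre_ excludes that, default is never observed there
  let last0 : Int := (PySem.List.pyGet? state 0).getD 0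
  let fin := (PySem.List.pyRange 1 (state.length : Int) 1).foldl
    (fun (st : Int × Int × List (List Int) × List (List Int) × Int) i =>
      let (last, temp_i, state_up, state_down, row) := st
      let x := PySem.List.pyGetD state i 0
      if x == last then
        if row == 0 then
          if x == 0 then (x, i, state_up, state_down ++ [[temp_i, i]], row + 1)
          else (x, i, state_up ++ [[temp_i, i]], state_down, row + 1)
        else
          if x == 0 then (x, i, state_up, pvModLast state_down i, row + 1)
          else (x, i, pvModLast state_up i, state_down, row + 1)
      else (x, i, state_up, state_down, (0 : Int)))
    (last0, 0, [], [], 0)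
  (fin.2.2.2.1, fin.2.2.1)

-- ===== PORT B =====
-- Source B, staged: bounds = [0] + [i+1 for i,(x,y) in enumerate(zip(state, state[1:])) if x != y] + [n];
-- periods = consecutive bound pairs of length >= 2; classified by state[a].
-- `state[1:]` is state.tail; range(a, b) is PySem.List.pyRange a b 1.
def separateUD_alt (state : List Int) : List (List Int) × List (List Int) :=
  let n : Int := (state.length : Int)
  let bounds : List Int :=
    (0 :: ((PySem.List.enumerate (state.zip state.tail) 0).filter
        (fun p => !(p.2.1 == p.2.2))).map (fun p => p.1 + 1)) ++ [n]
  let periods : List (Int × Int) :=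
    (bounds.zip bounds.tail).filter (fun p => 2 ≤ p.2 - p.1)
  ((periods.filter (fun p => PySem.List.pyGetD state p.1 0 == 0)).map
      (fun p => PySem.List.pyRange p.1 p.2 1),
   (periods.filter (fun p => !(PySem.List.pyGetD state p.1 0 == 0))).map
      (fun p => PySem.List.pyRange p.1 p.2 1))

-- ===== PRECONDITION & SPEC =====
-- Pre_ excludes only the empty list, on which A raises IndexError (state[0]).
def Pre_separateUD (state : List Int) : Prop := state ≠ []
instance (state : List Int) : Decidable (Pre_separateUD state) := by unfold Pre_separateUD; infer_instance
def pvWitness_separateUD : List Int := [0, 0, 1, 1, 1, 0, 2]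

def Spec_separateUD (state : List Int) (out : List (List Int) × List (List Int)) : Prop := out = separateUD_alt state
instance (state : List Int) (out : List (List Int) × List (List Int)) : Decidable (Spec_separateUD state out) := by unfold Spec_separateUD; infer_instance

-- ===== CLAIM (what is proved, stated in full; the proofs are below) =====
def Claim_equal_separateUD : Prop := ∀ (state : List Int), Dom_separateUD state → Pre_separateUD state → Spec_separateUD state (separateUD state)

-- ===== LEMMAS AND PROOFS =====

-- A's loop as structural recursion over the tail of `state`
def loopA (i tempi last : Int) (up down : List (List Int)) (row : Int) :
    List Int → List (List Int) × List (List Int)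
  | [] => (down, up)
  | x :: xs =>
    if x == last then
      if row == 0 then
        if x == 0 then loopA (i + 1) i x up (down ++ [[tempi, i]]) (row + 1) xs
        else loopA (i + 1) i x (up ++ [[tempi, i]]) down (row + 1) xs
      else
        if x == 0 then loopA (i + 1) i x up (pvModLast down i) (row + 1) xs
        else loopA (i + 1) i x (pvModLast up i) down (row + 1) xs
    else loopA (i + 1) i x up down 0 xs

-- bridge: the index fold of port A is loopA on the dropped suffix
theorem foldA_eq_loopA (state : List Int) :
    ∀ (xs : List Int) (i last tempi : Int) (up down : List (List Int)) (row : Int),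
      0 ≤ i → state.drop i.toNat = xs →
      ((PySem.List.pyRange i (state.length : Int) 1).foldl
        (fun (st : Int × Int × List (List Int) × List (List Int) × Int) i =>
          let (last, temp_i, state_up, state_down, row) := st
          let x := PySem.List.pyGetD state i 0
          if x == last then
            if row == 0 then
              if x == 0 then (x, i, state_up, state_down ++ [[temp_i, i]], row + 1)
              else (x, i, state_up ++ [[temp_i, i]], state_down, row + 1)
            else
              if x == 0 then (x, i, state_up, pvModLast state_down i, row + 1)
              else (x, i, pvModLast state_up i, state_down, row + 1)
          else (x, i, state_up, state_down, (0 : Int)))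
        (last, tempi, up, down, row)).2.2.2.1
      = (loopA i tempi last up down row xs).1 ∧
      ((PySem.List.pyRange i (state.length : Int) 1).foldl
        (fun (st : Int × Int × List (List Int) × List (List Int) × Int) i =>
          let (last, temp_i, state_up, state_down, row) := st
          let x := PySem.List.pyGetD state i 0
          if x == last then
            if row == 0 then
              if x == 0 then (x, i, state_up, state_down ++ [[temp_i, i]], row + 1)
              else (x, i, state_up ++ [[temp_i, i]], state_down, row + 1)
            else
              if x == 0 then (x, i, state_up, pvModLast state_down i, row + 1)
              else (x, i, pvModLast state_up i, state_down, row + 1)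
          else (x, i, state_up, state_down, (0 : Int)))
        (last, tempi, up, down, row)).2.2.1
      = (loopA i tempi last up down row xs).2 := by
  intro xs
  induction xs with
  | nil =>
    intro i last tempi up down row hi hdrop
    have hlen : (state.length : Int) ≤ i := by
      have := List.drop_eq_nil_iff.mp hdrop
      omega
    rw [PySem.List.pyRange_one_eq_nil hlen]
    simp [loopA]
  | cons x rest ih =>
    intro i last tempi up down row hi hdrop
    have hlt : i.toNat < state.length := by
      have := congrArg List.length hdrop
      simp [List.length_drop] at this
      omega
    have hil : i < (state.length : Int) := by omega
    have hx : PySem.List.pyGetD state i 0 = x := by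
      have hq : state[i.toNat]? = some x := by
        have h2 : (state.drop i.toNat)[0]? = some x := by rw [hdrop]; rfl
        rw [List.getElem?_drop] at h2
        simpa using h2
      have hcast : ((i.toNat : Int)) = i := Int.toNat_of_nonneg hi
      rw [← hcast, PySem.List.pyGetD_natCast, List.getD_eq_getElem?_getD, hq]
      rfl
    have hdrop' : state.drop (i + 1).toNat = rest := by
      have h3 : (i + 1).toNat = i.toNat + 1 := by omega
      rw [h3, ← List.drop_drop, hdrop]
      simp
    rw [PySem.List.pyRange_one_cons hil]
    simp only [List.foldl_cons, hx]
    by_cases h1 : x == last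
    · by_cases h2 : row == 0
      · by_cases h3 : x == 0
        · simpa [loopA, h1, h2, h3, hx] using ih (i + 1) x i up (down ++ [[tempi, i]]) (row + 1) (by omega) hdrop'
        · simpa [loopA, h1, h2, h3, hx] using ih (i + 1) x i (up ++ [[tempi, i]]) down (row + 1) (by omega) hdrop'
      · by_cases h3 : x == 0
        · simpa [loopA, h1, h2, h3, hx] using ih (i + 1) x i up (pvModLast down i) (row + 1) (by omega) hdrop'
        · simpa [loopA, h1, h2, h3, hx] using ih (i + 1) x i (pvModLast up i) down (row + 1) (by omega) hdrop'
    · simpa [loopA, h1, hx] using ih (i + 1) x i up down 0 (by omega) hdrop'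

-- run decomposition (itertools.groupby-like), used only in the proofs as the common midpoint
def pvRunsAux (x : Int) (cnt : Nat) : List Int → List (Int × Nat)
  | [] => [(x, cnt)]
  | y :: ys => if y == x then pvRunsAux x (cnt + 1) ys else (x, cnt) :: pvRunsAux y 1 ys

def pvBStep (acc : List (List Int) × List (List Int) × Int) (r : Int × Nat) :
    List (List Int) × List (List Int) × Int :=
  let idxs := (List.range r.2).map (fun j : Nat => acc.2.2 + (j : Int))
  let acc' :=
    if 2 ≤ r.2 then
      if r.1 == 0 then (acc.1 ++ [idxs], acc.2.1) else (acc.1, acc.2.1 ++ [idxs])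
    else (acc.1, acc.2.1)
  (acc'.1, acc'.2, acc.2.2 + (r.2 : Int))

-- the "current run so far" lists: what A has appended for a run of value v of length c ending before index i
def pvSides (v : Int) (c : Nat) (i : Int) (bd bu : List (List Int)) :
    List (List Int) × List (List Int) :=
  if c < 2 then (bd, bu)
  else if v = 0 then (bd ++ [(List.range c).map (fun j : Nat => i - c + j)], bu)
  else (bd, bu ++ [(List.range c).map (fun j : Nat => i - c + j)])

-- main A-side invariant: mid-run, loopA computes what the fold over the remaining runs computes
theorem loopA_eq_bfold :
    ∀ (xs : List Int) (v : Int) (c : Nat) (i : Int) (bd bu : List (List Int)) (row : Int),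
      1 ≤ c → 0 ≤ row → (row = 0 ↔ c = 1) →
      loopA i (i - 1) v (pvSides v c i bd bu).2 (pvSides v c i bd bu).1 row xs
        = (((pvRunsAux v c xs).foldl pvBStep (bd, bu, i - c)).1,
           ((pvRunsAux v c xs).foldl pvBStep (bd, bu, i - c)).2.1) := by
  intro xs
  induction xs with
  | nil =>
    intro v c i bd bu row h1 h0 hiff
    by_cases hc : c < 2
    · have hc1 : c = 1 := by omega
      subst hc1
      simp [loopA, pvSides, pvRunsAux, pvBStep]
    · by_cases hv : v = 0
      · simp [loopA, pvSides, pvRunsAux, pvBStep, hc, hv, if_pos (by omega : 2 ≤ c)]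
      · simp [loopA, pvSides, pvRunsAux, pvBStep, hc, hv, if_pos (by omega : 2 ≤ c)]
  | cons x xs ih =>
    intro v c i bd bu row h1 h0 hiff
    by_cases hx : x = v
    · subst hx
      have hrw : pvRunsAux x c (x :: xs) = pvRunsAux x (c + 1) xs := by simp [pvRunsAux]
      rw [hrw]
      by_cases hrow : row = 0
      · have hc1 : c = 1 := hiff.mp hrow
        subst hc1; subst hrow
        have hsides : pvSides x 1 i bd bu = (bd, bu) := by simp [pvSides]
        rw [hsides]
        by_cases hx0 : x = 0
        · have hih := ih x 2 (i + 1) bd bu 1 (by omega) (by omega) (by omega)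
          have hs2 : pvSides x 2 (i + 1) bd bu = (bd ++ [[i - 1, i]], bu) := by
            simp [pvSides, hx0, List.range_succ]
            omega
          rw [hs2] at hih
          have hstart : (i + 1) - ((2 : Nat) : Int) = i - ((1 : Nat) : Int) := by push_cast; ring
          rw [hstart] at hih
          simpa [loopA, hx0] using hih
        · have hih := ih x 2 (i + 1) bd bu 1 (by omega) (by omega) (by omega)
          have hs2 : pvSides x 2 (i + 1) bd bu = (bd, bu ++ [[i - 1, i]]) := by
            simp [pvSides, hx0, List.range_succ]
            omega
          rw [hs2] at hih
          have hstart : (i + 1) - ((2 : Nat) : Int) = i - ((1 : Nat) : Int) := by push_cast; ring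
          rw [hstart] at hih
          simpa [loopA, hx0] using hih
      · have hc2 : 2 ≤ c := by
          have := (not_iff_not.mpr hiff).mp hrow
          omega
        have hrun : (List.range (c + 1)).map (fun j : Nat => (i + 1) - ((c : Int) + 1) + (j : Int))
            = (List.range c).map (fun j : Nat => i - (c : Int) + (j : Int)) ++ [i] := by
          rw [List.range_succ, List.map_append]
          congr 1
          · apply List.map_congr_left
            intro j _
            push_cast
            try ring
          · simp
            try ring
        have hstart : (i + 1) - (((c + 1 : Nat)) : Int) = i - ((c : Nat) : Int) := by push_cast; ring
        by_cases hx0 : x = 0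
        · have hsides : pvSides x c i bd bu = (bd ++ [(List.range c).map (fun j : Nat => i - (c : Int) + (j : Int))], bu) := by
            simp [pvSides, hx0]
            try omega
          have hih := ih x (c + 1) (i + 1) bd bu (row + 1) (by omega) (by omega) (by omega)
          have hs2 : pvSides x (c + 1) (i + 1) bd bu
              = (bd ++ [(List.range c).map (fun j : Nat => i - (c : Int) + (j : Int)) ++ [i]], bu) := by
            simp only [pvSides, if_neg (by omega : ¬ c + 1 < 2), if_pos hx0]
            have hfun : (fun j : Nat => i + 1 - ((c + 1 : Nat) : Int) + (j : Int))
                = (fun j : Nat => (i + 1) - ((c : Int) + 1) + (j : Int)) := by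
              funext j; push_cast; ring
            rw [hfun, hrun]
          rw [hs2, hstart] at hih
          rw [hsides]
          have hmod : pvModLast (bd ++ [(List.range c).map (fun j : Nat => i - (c : Int) + (j : Int))]) i
              = bd ++ [(List.range c).map (fun j : Nat => i - (c : Int) + (j : Int)) ++ [i]] := by
            simp [pvModLast]
          simpa [loopA, hx0, hrow, hmod] using hih
        · have hsides : pvSides x c i bd bu = (bd, bu ++ [(List.range c).map (fun j : Nat => i - (c : Int) + (j : Int))]) := by
            simp [pvSides, hx0]
            try omega
          have hih := ih x (c + 1) (i + 1) bd bu (row + 1) (by omega) (by omega) (by omega)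
          have hs2 : pvSides x (c + 1) (i + 1) bd bu
              = (bd, bu ++ [(List.range c).map (fun j : Nat => i - (c : Int) + (j : Int)) ++ [i]]) := by
            simp only [pvSides, if_neg (by omega : ¬ c + 1 < 2), if_neg hx0]
            have hfun : (fun j : Nat => i + 1 - ((c + 1 : Nat) : Int) + (j : Int))
                = (fun j : Nat => (i + 1) - ((c : Int) + 1) + (j : Int)) := by
              funext j; push_cast; ring
            rw [hfun, hrun]
          rw [hs2, hstart] at hih
          rw [hsides]
          have hmod : pvModLast (bu ++ [(List.range c).map (fun j : Nat => i - (c : Int) + (j : Int))]) i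
              = bu ++ [(List.range c).map (fun j : Nat => i - (c : Int) + (j : Int)) ++ [i]] := by
            simp [pvModLast]
          simpa [loopA, hx0, hrow, hmod] using hih
    · have hrw : pvRunsAux v c (x :: xs) = (v, c) :: pvRunsAux x 1 xs := by
        simp [pvRunsAux, hx]
      rw [hrw, List.foldl_cons]
      have hstep : pvBStep (bd, bu, i - (c : Int)) (v, c)
          = ((pvSides v c i bd bu).1, (pvSides v c i bd bu).2, i) := by
        simp only [pvBStep, pvSides, beq_iff_eq]
        by_cases hc : c < 2
        · simp only [if_neg (by omega : ¬ 2 ≤ c), if_pos hc]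
          simp
          try omega
        · by_cases hv : v = 0 <;>
            · simp only [if_pos (by omega : 2 ≤ c), if_neg hc, hv]
              simp
              try omega
      rw [hstep]
      have hih := ih x 1 (i + 1) (pvSides v c i bd bu).1 (pvSides v c i bd bu).2 0 (by omega) (by omega) (by simp)
      have hs1 : pvSides x 1 (i + 1) (pvSides v c i bd bu).1 (pvSides v c i bd bu).2
          = ((pvSides v c i bd bu).1, (pvSides v c i bd bu).2) := by simp [pvSides]
      rw [hs1] at hih
      have hst : (i + 1) - ((1 : Nat) : Int) = i := by push_cast; ring
      rw [hst] at hih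
      have hne : (x == v) = false := by simp [hx]
      simpa [loopA, hne] using hih

-- ===== B-side machinery: runs, starts, change points =====

def pvFlat (rs : List (Int × Nat)) : List Int := rs.flatMap (fun r => List.replicate r.2 r.1)

def pvTotal (rs : List (Int × Nat)) : Nat := (rs.map (fun r => r.2)).sum

def pvStarts (t : Int) : List (Int × Nat) → List Int
  | [] => []
  | r :: rest => t :: pvStarts (t + (r.2 : Int)) rest

-- the change-point comprehension of port B, with a general start offset
def pvC (l : List Int) (s : Int) : List Int :=
  ((PySem.List.enumerate (l.zip l.tail) s).filter (fun p => !(p.2.1 == p.2.2))).map (fun p => p.1 + 1)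

-- the bounds→output pipeline of port B
def pvOut (state : List Int) (bnds : List Int) : List (List Int) × List (List Int) :=
  let periods : List (Int × Int) := (bnds.zip bnds.tail).filter (fun p => 2 ≤ p.2 - p.1)
  ((periods.filter (fun p => PySem.List.pyGetD state p.1 0 == 0)).map
      (fun p => PySem.List.pyRange p.1 p.2 1),
   (periods.filter (fun p => !(PySem.List.pyGetD state p.1 0 == 0))).map
      (fun p => PySem.List.pyRange p.1 p.2 1))

theorem alt_eq_pvOut (state : List Int) :
    separateUD_alt state = pvOut state ((0 :: pvC state 0) ++ [(state.length : Int)]) := rfl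

theorem pvC_single (x : Int) (s : Int) : pvC [x] s = [] := rfl

theorem pvC_cons (x y : Int) (t : List Int) (s : Int) :
    pvC (x :: y :: t) s = (if x = y then [] else [s + 1]) ++ pvC (y :: t) (s + 1) := by
  by_cases h : x = y <;>
    simp [pvC, PySem.List.enumerate_cons, List.filter_cons, h]

theorem pvC_rep : ∀ (c : Nat) (v : Int) (l : List Int) (s : Int),
    pvC (v :: (List.replicate c v ++ l)) s = pvC (v :: l) (s + (c : Int)) := by
  intro c
  induction c with
  | zero => intro v l s; simp
  | succ c ih =>
    intro v l s
    rw [List.replicate_succ]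
    have := pvC_cons v v (List.replicate c v ++ l) s
    rw [if_pos rfl] at this
    simp only [List.cons_append, this, List.nil_append]
    rw [ih v l (s + 1)]
    congr 1
    push_cast
    ring

theorem pvC_runs : ∀ (rs : List (Int × Nat)) (v : Int) (c : Nat) (s : Int),
    (∀ r ∈ rs, 1 ≤ r.2) → List.IsChain (fun a b => a ≠ b) (v :: rs.map (fun r => r.1)) →
    pvC (v :: (List.replicate c v ++ pvFlat rs)) s = pvStarts (s + (c : Int) + 1) rs := by
  intro rs
  induction rs with
  | nil =>
    intro v c s _ _
    rw [pvC_rep]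
    simp [pvFlat, pvStarts, pvC_single]
  | cons r rest ih =>
    intro v c s hlen hchain
    obtain ⟨w, d⟩ := r
    rw [List.map_cons, List.isChain_cons_cons] at hchain
    have hd : 1 ≤ d := hlen (w, d) (by simp)
    have hflat : pvFlat ((w, d) :: rest) = w :: (List.replicate (d - 1) w ++ pvFlat rest) := by
      simp only [pvFlat, List.flatMap_cons]
      rw [show d = (d - 1) + 1 by omega, List.replicate_succ]
      simp
    rw [hflat, pvC_rep, pvC_cons, if_neg hchain.1,
        ih w (d - 1) (s + (c : Int) + 1) (fun r hr => hlen r (by simp [hr])) hchain.2]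
    have : s + (c : Int) + 1 + ((d - 1 : Nat) : Int) + 1 = s + (c : Int) + 1 + (d : Int) := by
      push_cast [hd]
      omega
    rw [this]
    rfl

theorem pvFlat_runsAux : ∀ (xs : List Int) (v : Int) (c : Nat),
    pvFlat (pvRunsAux v c xs) = List.replicate c v ++ xs := by
  intro xs
  induction xs with
  | nil => intro v c; simp [pvRunsAux, pvFlat]
  | cons y ys ih =>
    intro v c
    by_cases h : y = v
    · subst h
      rw [pvRunsAux, if_pos (by simp), ih, List.replicate_succ']
      simp
    · rw [pvRunsAux, if_neg (by simp [h])]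
      simp only [pvFlat, List.flatMap_cons] at *
      rw [ih]
      simp

theorem pvRunsAux_pos : ∀ (xs : List Int) (v : Int) (c : Nat), 1 ≤ c →
    ∀ r ∈ pvRunsAux v c xs, 1 ≤ r.2 := by
  intro xs
  induction xs with
  | nil => intro v c hc r hr; simp [pvRunsAux] at hr; subst hr; exact hc
  | cons y ys ih =>
    intro v c hc r hr
    by_cases h : y = v
    · subst h
      rw [pvRunsAux, if_pos (by simp)] at hr
      exact ih _ (c + 1) (by omega) r hr
    · rw [pvRunsAux, if_neg (by simp [h])] at hr
      rcases List.mem_cons.mp hr with h1 | h1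
      · subst h1; exact hc
      · exact ih y 1 (by omega) r h1

theorem pvRunsAux_shape : ∀ (xs : List Int) (v : Int) (c : Nat),
    ∃ (k : Nat) (rest : List (Int × Nat)),
      pvRunsAux v c xs = (v, c + k) :: rest ∧
      List.IsChain (fun a b => a ≠ b) (v :: rest.map (fun r => r.1)) := by
  intro xs
  induction xs with
  | nil => intro v c; exact ⟨0, [], by simp [pvRunsAux], by simp⟩
  | cons y ys ih =>
    intro v c
    by_cases h : y = v
    · subst h
      obtain ⟨k, rest, h1, h2⟩ := ih y (c + 1)
      have hk : c + 1 + k = c + (k + 1) := by omega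
      exact ⟨k + 1, rest, by rw [pvRunsAux, if_pos (by simp), h1, hk], h2⟩
    · obtain ⟨k, rest, h1, h2⟩ := ih y 1
      refine ⟨0, pvRunsAux y 1 ys, by rw [pvRunsAux, if_neg (by simp [h]), Nat.add_zero], ?_⟩
      rw [h1]
      simp only [List.map_cons]
      exact List.isChain_cons_cons.mpr ⟨fun he => h he.symm, h2⟩

theorem pvFlat_length (rs : List (Int × Nat)) : (pvFlat rs).length = pvTotal rs := by
  simp [pvFlat, pvTotal, List.length_flatMap, Function.comp_def]

-- closed form of range(t, t+c)
theorem pyRange_add (t : Int) (c : Nat) :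
    PySem.List.pyRange t (t + (c : Int)) 1 = (List.range c).map (fun j : Nat => t + (j : Int)) := by
  have h : ((t + (c : Int) - t)).toNat = c := by omega
  rw [PySem.List.pyRange_one, h]

theorem pvOut_cons (state : List Int) (a b : Int) (l' : List Int) :
    pvOut state (a :: b :: l')
      = if 2 ≤ b - a then
          (if PySem.List.pyGetD state a 0 = 0 then
            (PySem.List.pyRange a b 1 :: (pvOut state (b :: l')).1, (pvOut state (b :: l')).2)
          else
            ((pvOut state (b :: l')).1, PySem.List.pyRange a b 1 :: (pvOut state (b :: l')).2))
        else pvOut state (b :: l') := by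
  by_cases h1 : 2 ≤ b - a <;> by_cases h2 : PySem.List.pyGetD state a 0 = 0 <;>
    simp [pvOut, List.zip_cons_cons, List.filter_cons, h1, h2]

-- main B-side lemma: the staged pipeline over the run starts equals the fold over the runs
theorem staged_eq_fold (state : List Int) :
    ∀ (rs : List (Int × Nat)) (t : Int) (bd bu : List (List Int)),
      0 ≤ t → (∀ r ∈ rs, 1 ≤ r.2) → state.drop t.toNat = pvFlat rs →
      (bd ++ (pvOut state (pvStarts t rs ++ [t + (pvTotal rs : Int)])).1,
       bu ++ (pvOut state (pvStarts t rs ++ [t + (pvTotal rs : Int)])).2)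
      = ((rs.foldl pvBStep (bd, bu, t)).1, (rs.foldl pvBStep (bd, bu, t)).2.1) := by
  intro rs
  induction rs with
  | nil =>
    intro t bd bu _ _ _
    simp [pvStarts, pvTotal, pvOut]
  | cons r rest ih =>
    intro t bd bu ht hlen hdrop
    obtain ⟨v, c⟩ := r
    have hc : 1 ≤ c := hlen (v, c) (by simp)
    -- the tail of the bounds list starts with t + c
    have htot : t + (pvTotal ((v, c) :: rest) : Int) = (t + (c : Int)) + (pvTotal rest : Int) := by
      simp [pvTotal]
      push_cast
      ring
    have hbnds : pvStarts t ((v, c) :: rest) ++ [t + (pvTotal ((v, c) :: rest) : Int)]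
        = t :: (pvStarts (t + (c : Int)) rest ++ [(t + (c : Int)) + (pvTotal rest : Int)]) := by
      rw [htot]; rfl
    obtain ⟨l', hl'⟩ : ∃ l', pvStarts (t + (c : Int)) rest ++ [(t + (c : Int)) + (pvTotal rest : Int)]
        = (t + (c : Int)) :: l' := by
      cases rest with
      | nil => exact ⟨[(t + (c : Int)) + (pvTotal [] : Int)].tail, by simp [pvStarts, pvTotal]⟩
      | cons r2 rest2 => exact ⟨_, rfl⟩
    -- the value at index t is v
    have hflat : pvFlat ((v, c) :: rest) = List.replicate c v ++ pvFlat rest := by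
      simp [pvFlat]
    have hget : PySem.List.pyGetD state t 0 = v := by
      have hq : state[t.toNat]? = some v := by
        have h2 : (state.drop t.toNat)[0]? = some v := by
          rw [hdrop, hflat, show c = (c - 1) + 1 by omega, List.replicate_succ]
          rfl
        rw [List.getElem?_drop] at h2
        simpa using h2
      have hcast : ((t.toNat : Int)) = t := Int.toNat_of_nonneg ht
      rw [← hcast, PySem.List.pyGetD_natCast, List.getD_eq_getElem?_getD, hq]
      rfl
    have hdrop' : state.drop (t + (c : Int)).toNat = pvFlat rest := by
      have h3 : (t + (c : Int)).toNat = t.toNat + c := by omega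
      rw [h3, ← List.drop_drop, hdrop, hflat]
      have := List.drop_left (l₁ := List.replicate c v) (l₂ := pvFlat rest)
      simpa using this
    have hsub : t + (c : Int) - t = (c : Int) := by ring
    have hrange : PySem.List.pyRange t (t + (c : Int)) 1
        = (List.range c).map (fun j : Nat => t + (j : Int)) := pyRange_add t c
    have hlen' : ∀ r ∈ rest, 1 ≤ r.2 := fun r hr => hlen r (List.mem_cons_of_mem _ hr)
    rw [hbnds, hl', pvOut_cons, hsub, hget]
    by_cases h2c : 2 ≤ (c : Int)
    · by_cases hv : v = 0
      · rw [if_pos h2c, if_pos hv]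
        have hstep : pvBStep (bd, bu, t)
            (v, c) = (bd ++ [(List.range c).map (fun j : Nat => t + (j : Int))], bu, t + (c : Int)) := by
          simp [pvBStep, hv, show 2 ≤ c by omega]
        rw [List.foldl_cons, hstep]
        have hih := ih (t + (c : Int)) (bd ++ [(List.range c).map (fun j : Nat => t + (j : Int))]) bu
          (by omega) hlen' hdrop'
        rw [hl'] at hih
        rw [← hih]
        simp [hrange, List.append_assoc]
      · rw [if_pos h2c, if_neg hv]
        have hstep : pvBStep (bd, bu, t)
            (v, c) = (bd, bu ++ [(List.range c).map (fun j : Nat => t + (j : Int))], t + (c : Int)) := by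
          simp [pvBStep, hv, show 2 ≤ c by omega]
        rw [List.foldl_cons, hstep]
        have hih := ih (t + (c : Int)) bd (bu ++ [(List.range c).map (fun j : Nat => t + (j : Int))])
          (by omega) hlen' hdrop'
        rw [hl'] at hih
        rw [← hih]
        simp [hrange, List.append_assoc]
    · rw [if_neg h2c]
      have hstep : pvBStep (bd, bu, t) (v, c) = (bd, bu, t + (c : Int)) := by
        simp [pvBStep, show ¬ 2 ≤ c by omega]
      rw [List.foldl_cons, hstep]
      have hih := ih (t + (c : Int)) bd bu (by omega) hlen' hdrop'
      rw [hl'] at hih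
      exact hih

-- ===== VERDICT (by name: the statement is the Claim_ definition above) =====
theorem separateUD_spec : Claim_equal_separateUD := by
  unfold Claim_equal_separateUD
  intro state _ hpre
  unfold Spec_separateUD
  cases state with
  | nil => exact absurd rfl hpre
  | cons x xs =>
    have hb := foldA_eq_loopA (x :: xs) xs 1 x 0 [] [] 0 (by norm_num) (by simp)
    have hm := loopA_eq_bfold xs x 1 1 [] [] 0 (by omega) (by omega) (by simp)
    have hs : pvSides x 1 1 [] [] = ([], []) := by simp [pvSides]
    rw [hs] at hm
    norm_num at hm
    -- B side: the staged pipeline equals the same fold over the runs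
    obtain ⟨k, rest, hshape, hchain⟩ := pvRunsAux_shape xs x 1
    have hpos : ∀ r ∈ pvRunsAux x 1 xs, 1 ≤ r.2 := pvRunsAux_pos xs x 1 (by omega)
    have hflatR : pvFlat (pvRunsAux x 1 xs) = x :: xs := by
      rw [pvFlat_runsAux]; simp
    have hxs : xs = List.replicate k x ++ pvFlat rest := by
      have h1 := hflatR
      rw [hshape] at h1
      have h2 : pvFlat ((x, 1 + k) :: rest) = x :: (List.replicate k x ++ pvFlat rest) := by
        simp [pvFlat, show 1 + k = k + 1 from Nat.add_comm 1 k, List.replicate_succ]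
      rw [h2] at h1
      simpa using h1.symm
    have hrestpos : ∀ r ∈ rest, 1 ≤ r.2 := by
      intro r hr
      exact hpos r (by rw [hshape]; exact List.mem_cons_of_mem _ hr)
    have hC : pvC (x :: xs) 0 = pvStarts ((0 : Int) + (k : Int) + 1) rest := by
      rw [show (x :: xs : List Int) = x :: (List.replicate k x ++ pvFlat rest) by rw [← hxs]]
      exact pvC_runs rest x k 0 hrestpos hchain
    have hstart : (0 : Int) + ((1 + k : Nat) : Int) = 0 + (k : Int) + 1 := by push_cast; ring
    have htotal' : (pvTotal ((x, 1 + k) :: rest) : Int) = (((x :: xs : List Int)).length : Int) := by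
      rw [← hshape, ← pvFlat_length, hflatR]
    have hbnds2 : pvStarts 0 (pvRunsAux x 1 xs) ++ [(0 : Int) + (pvTotal (pvRunsAux x 1 xs) : Int)]
        = (0 :: pvC (x :: xs) 0) ++ [(((x :: xs : List Int)).length : Int)] := by
      rw [hshape, hC]
      simp only [pvStarts, htotal', hstart]
      simp
    have halt : separateUD_alt (x :: xs)
        = (((pvRunsAux x 1 xs).foldl pvBStep ([], [], 0)).1,
           ((pvRunsAux x 1 xs).foldl pvBStep ([], [], 0)).2.1) := by
      rw [alt_eq_pvOut, ← hbnds2]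
      have hfold := staged_eq_fold (x :: xs) (pvRunsAux x 1 xs) 0 [] []
        (by omega) hpos (by simpa using hflatR.symm)
      simpa using hfold
    rw [halt]
    unfold separateUD
    simp only [PySem.List.pyGet?_zero_cons, Option.getD_some]
    refine Prod.ext ?_ ?_
    · exact hb.1.trans (by rw [hm])
    · exact hb.2.trans (by rw [hm])
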